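-- pv_equiv track=rewrite | github.com/Shubhamkumarjha1244/DSA_PYTHON | DSA-using_python/SDE DP/maximum_prod_arr.py | max_prod_arr
-- ===== SOURCE A (Python) =====
-- def max_prod_arr(arr):
--     front=1
--     back=1
--     for ele in arr:
--         if ele==0:front=1
--         else:front*=ele
--     for ele in arr[::-1]:
--         if ele==0:back=1
--         else:back*=ele
--     return max(front,back)
-- ===== SOURCE B (Python) =====
-- def max_prod_arr(arr):
--     def prod(xs):
--         p = 1
--         for x in xs:
--             p *= x
--         return p
--     if 0 not in arr:
--         return prod(arr)
--     first = arr.index(0)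
--     last = len(arr) - 1 - arr[::-1].index(0)
--     back = prod(arr[:first])
--     front = prod(arr[last + 1:])
--     return max(front, back)
-- ===== Notes on version B (the rewrite author's own statement) =====
-- stated objective: simpler
-- what changed: Replaces the two reset-on-zero accumulation scans by locating the first/last zero with index() and taking plain products of the slice before the first zero and after the last zero.
import Mathlib
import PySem

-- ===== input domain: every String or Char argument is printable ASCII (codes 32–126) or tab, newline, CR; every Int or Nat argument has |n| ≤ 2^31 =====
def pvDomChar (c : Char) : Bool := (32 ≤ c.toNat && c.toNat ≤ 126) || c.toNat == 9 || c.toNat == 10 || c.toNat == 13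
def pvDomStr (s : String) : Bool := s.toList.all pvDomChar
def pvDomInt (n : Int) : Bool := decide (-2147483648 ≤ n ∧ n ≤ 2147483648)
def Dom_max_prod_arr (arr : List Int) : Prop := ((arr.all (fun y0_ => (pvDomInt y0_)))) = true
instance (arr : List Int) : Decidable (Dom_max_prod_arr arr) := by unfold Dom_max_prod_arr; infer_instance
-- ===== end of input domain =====

-- B locates the first/last zero with index() and multiplies the slices before/after them,
-- instead of A's two reset-on-zero accumulation scans; objective: simpler decomposition.

-- ===== PORT A =====
def max_prod_arr (arr : List Int) : Int :=
  let front := arr.foldl (fun front ele => if ele = 0 then 1 else front * ele) 1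
  -- arr[::-1] ported via PySem.List.slice? with step -1
  let back := ((PySem.List.slice? arr none none (-1)).getD []).foldl
      (fun back ele => if ele = 0 then 1 else back * ele) 1
  max front back

-- ===== PORT B =====
-- Source B's inner helper prod (a plain accumulating loop)
def pvProd (xs : List Int) : Int := xs.foldl (fun p x => p * x) 1

def max_prod_arr_alt (arr : List Int) : Int :=
  if (0 : Int) ∈ arr then
    let first : Nat := (PySem.List.index? arr 0).getD 0
    let revIdx : Nat := ((PySem.List.slice? arr none none (-1)).getD [] |>
        (PySem.List.index? · 0)).getD 0
    let last : Int := (arr.length : Int) - 1 - (revIdx : Int)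
    let back := pvProd (PySem.List.slice arr none (some (first : Int)))
    let front := pvProd (PySem.List.slice arr (some (last + 1)) none)
    max front back
  else pvProd arr

-- ===== PRECONDITION & SPEC =====
def Spec_max_prod_arr (arr : List Int) (out : Int) : Prop := out = max_prod_arr_alt arr
instance (arr : List Int) (out : Int) : Decidable (Spec_max_prod_arr arr out) := by unfold Spec_max_prod_arr; infer_instance

-- ===== CLAIM (what is proved, stated in full; the proofs are below) =====
def Claim_equal_max_prod_arr : Prop := ∀ (arr : List Int), Dom_max_prod_arr arr → Spec_max_prod_arr arr (max_prod_arr arr)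

-- ===== LEMMAS AND PROOFS =====

theorem pvProd_eq_prod (l : List Int) : pvProd l = l.prod := by
  unfold pvProd
  suffices h : ∀ a : Int, l.foldl (fun p x => p * x) a = a * l.prod by
    simpa using h 1
  induction l with
  | nil => simp
  | cons x t ih => intro a; simp [List.foldl_cons, ih, mul_assoc]

theorem pvF_no_zero (l : List Int) (a : Int) (h : (0 : Int) ∉ l) :
    l.foldl (fun f e => if e = 0 then 1 else f * e) a = a * l.prod := by
  induction l generalizing a with
  | nil => simp
  | cons x t ih =>
      have hx : x ≠ 0 := fun hx => h (by simp [hx])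
      have ht : (0 : Int) ∉ t := fun hm => h (List.mem_cons_of_mem _ hm)
      simp [List.foldl_cons, hx, ih _ ht, mul_assoc]

theorem pvF_reset (pre suf : List Int) (a : Int) :
    (pre ++ 0 :: suf).foldl (fun f e => if e = 0 then 1 else f * e) a
      = suf.foldl (fun f e => if e = 0 then 1 else f * e) 1 := by
  rw [List.foldl_append]
  simp [List.foldl_cons]

theorem max_prod_arr_spec : Claim_equal_max_prod_arr := by
  intro arr _
  unfold Spec_max_prod_arr max_prod_arr max_prod_arr_alt
  rw [PySem.List.slice?_none_none_neg_one]
  simp only [Option.getD_some]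
  by_cases h0 : (0 : Int) ∈ arr
  · simp only [h0, if_pos]
    -- first-zero decomposition of arr
    obtain ⟨k, hk⟩ : ∃ k, PySem.List.index? arr 0 = some k := by
      have := (PySem.List.index?_isSome_iff (xs := arr) (v := (0:Int))).mpr h0
      exact Option.isSome_iff_exists.mp this
    obtain ⟨pre, suf, harr, hlen, hpre⟩ := (PySem.List.index?_eq_some_iff _ _ _).mp hk
    -- first-zero decomposition of arr.reverse
    have h0r : (0 : Int) ∈ arr.reverse := by simpa using h0
    obtain ⟨j, hj⟩ : ∃ j, PySem.List.index? arr.reverse 0 = some j := by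
      have := (PySem.List.index?_isSome_iff (xs := arr.reverse) (v := (0:Int))).mpr h0r
      exact Option.isSome_iff_exists.mp this
    obtain ⟨rpre, rsuf, hrev, hrlen, hrpre⟩ := (PySem.List.index?_eq_some_iff _ _ _).mp hj
    have harr' : arr = rsuf.reverse ++ 0 :: rpre.reverse := by
      have := congrArg List.reverse hrev
      simpa [List.reverse_append] using this
    rw [hk, hj]
    simp only [Option.getD_some]
    -- front of A: product of the segment after the last zero
    have hfrontA : arr.foldl (fun f e => if e = 0 then 1 else f * e) 1
        = rpre.reverse.prod := by
      rw [harr', pvF_reset]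
      have : (0 : Int) ∉ rpre.reverse := by simpa using hrpre
      simpa using pvF_no_zero _ 1 this
    -- back of A: product of the segment before the first zero
    have hbackA : arr.reverse.foldl (fun f e => if e = 0 then 1 else f * e) 1
        = pre.prod := by
      have : arr.reverse = suf.reverse ++ 0 :: pre.reverse := by
        have := congrArg List.reverse harr
        simpa [List.reverse_append] using this
      rw [this, pvF_reset]
      have hp : (0 : Int) ∉ pre.reverse := by simpa using hpre
      have := pvF_no_zero pre.reverse 1 hp
      simpa using this
    -- back of B: slice before the first zero is pre
    have hsliceB : PySem.List.slice arr none (some (k : Int)) = pre := by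
      rw [PySem.List.slice_to_natCast, harr, ← hlen]
      exact List.take_left
    -- front of B: slice after the last zero is rpre.reverse
    have hlenarr : arr.length = rsuf.length + 1 + rpre.length := by
      rw [harr']; simp [Nat.add_comm, Nat.add_left_comm]
    have hsliceF : PySem.List.slice arr
        (some ((arr.length : Int) - 1 - (j : Int) + 1)) none = rpre.reverse := by
      have hj' : (arr.length : Int) - 1 - (j : Int) + 1 = ((rsuf.length + 1 : Nat) : Int) := by
        rw [hlenarr, ← hrlen]; push_cast; ring
      rw [hj', PySem.List.slice_from_natCast, harr']
      rw [show rsuf.length + 1 = rsuf.reverse.length + 1 by simp]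
      simp [List.drop_append]
    rw [hfrontA, hbackA, hsliceB, hsliceF, pvProd_eq_prod, pvProd_eq_prod]
  · simp only [h0, if_neg, not_false_iff]
    have hr0 : (0 : Int) ∉ arr.reverse := by simpa using h0
    rw [pvF_no_zero arr 1 h0, pvF_no_zero arr.reverse 1 hr0, pvProd_eq_prod]
    simp

-- ===== VERDICT (by name: the statement is the Claim_ definition above) =====
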